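-- pv_equiv track=rewrite | github.com/XaicuL/6.1200J | Week 3/ps/ps1.py | base_n_value
-- ===== SOURCE A (Python) =====
-- def base_n_value(perm):
--     # Noise: Shadow length
--     n = len(perm)
--     perm_lst = list(perm)
--     total_val = 0
--
--     for i in range(n):
--         # Noise: Intermediate exponentiation
--         exponent = n - 1 - i
--         contribution = perm_lst[i] * (n ** exponent)
--         total_val += contribution
--
--     return total_val
-- ===== SOURCE B (Python) =====
-- def base_n_value(perm):
--     # Horner's method: one pass, O(n) multiplications of bounded growth
--     n = len(perm)
--     total = 0
--     for d in perm:
--         total = total * n + d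
--     return total
-- ===== Notes on version B (the rewrite author's own statement) =====
-- stated objective: faster
-- what changed: Replaced the indexed loop computing perm[i]*n**(n-1-i) for each position with a single Horner pass total = total*n + d, eliminating the per-iteration exponentiation.
import Mathlib
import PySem

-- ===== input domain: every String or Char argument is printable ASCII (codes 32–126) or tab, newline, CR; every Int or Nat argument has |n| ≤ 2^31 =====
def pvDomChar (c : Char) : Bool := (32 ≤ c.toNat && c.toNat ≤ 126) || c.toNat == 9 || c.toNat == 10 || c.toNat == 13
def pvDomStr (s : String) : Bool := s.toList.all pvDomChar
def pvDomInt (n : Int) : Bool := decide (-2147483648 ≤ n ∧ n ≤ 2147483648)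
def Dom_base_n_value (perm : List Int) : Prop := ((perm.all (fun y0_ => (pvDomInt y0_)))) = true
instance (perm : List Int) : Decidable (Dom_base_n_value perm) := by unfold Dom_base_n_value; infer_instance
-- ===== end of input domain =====

-- B replaces A's per-index exponentiation loop with a single Horner pass (objective: faster).

-- ===== PORT A =====
def base_n_value (perm : List Int) : Int :=
  let n : Int := perm.length
  let perm_lst := perm
  (PySem.List.pyRange 0 n 1).foldl (fun total_val i =>
    let exponent := n - 1 - i
    let contribution := PySem.List.pyGetD perm_lst i 0 * (n ^ exponent.toNat)
    total_val + contribution) 0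

-- ===== PORT B =====
def base_n_value_alt (perm : List Int) : Int :=
  let n : Int := perm.length
  perm.foldl (fun total d => total * n + d) 0

-- ===== PRECONDITION & SPEC =====
def Spec_base_n_value (perm : List Int) (out : Int) : Prop := out = base_n_value_alt perm
instance (perm : List Int) (out : Int) : Decidable (Spec_base_n_value perm out) := by unfold Spec_base_n_value; infer_instance

-- ===== CLAIM (what is proved, stated in full; the proofs are below) =====
def Claim_equal_base_n_value : Prop := ∀ (perm : List Int), Dom_base_n_value perm → Spec_base_n_value perm (base_n_value perm)

-- ===== LEMMAS AND PROOFS =====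

-- Horner fold with base n equals the positional sum Σ xs[i]·n^(len−1−i), for ANY base n.
theorem pv_horner_eq_sum (n : Int) (xs : List Int) :
    xs.foldl (fun total d => total * n + d) 0 =
      ((PySem.List.pyRange 0 (xs.length : Int) 1).map
        (fun i => PySem.List.pyGetD xs i 0 * n ^ (((xs.length : Int) - 1 - i).toNat))).sum := by
  induction xs using List.reverseRecOn with
  | nil => simp [PySem.List.pyRange]
  | append_singleton ys x ih =>
    rw [List.foldl_append]
    have hlen : ((ys ++ [x]).length : Int) = (ys.length : Int) + 1 := by
      simp
    rw [hlen, PySem.List.pyRange_one_succ_right (by positivity), List.map_append, List.sum_append]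
    have hlast : PySem.List.pyGetD (ys ++ [x]) (ys.length : Int) 0 = x := by
      rw [PySem.List.pyGetD_natCast]
      simp
    have hmap : ((PySem.List.pyRange 0 (ys.length : Int) 1).map
        (fun i => PySem.List.pyGetD (ys ++ [x]) i 0 * n ^ (((ys.length : Int) + 1 - 1 - i).toNat))) =
        ((PySem.List.pyRange 0 (ys.length : Int) 1).map
        (fun i => n * (PySem.List.pyGetD ys i 0 * n ^ (((ys.length : Int) - 1 - i).toNat)))) := by
      apply List.map_congr_left
      intro i hi
      rw [PySem.List.mem_pyRange_one] at hi
      obtain ⟨h0, h1⟩ := hi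
      have hget : PySem.List.pyGetD (ys ++ [x]) i 0 = PySem.List.pyGetD ys i 0 := by
        lift i to ℕ using h0
        rw [PySem.List.pyGetD_natCast, PySem.List.pyGetD_natCast]
        have : i < ys.length := by exact_mod_cast h1
        rw [List.getD_eq_getElem?_getD, List.getD_eq_getElem?_getD,
            List.getElem?_append_left this]
      have hexp : (((ys.length : Int) + 1 - 1 - i).toNat) = (((ys.length : Int) - 1 - i).toNat) + 1 := by
        omega
      rw [hget, hexp, pow_succ]
      ring
    rw [hmap, List.sum_map_mul_left, ← ih]
    simp [hlast]
    ring

-- ===== VERDICT (by name: the statement is the Claim_ definition above) =====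
theorem base_n_value_spec : Claim_equal_base_n_value := by
  unfold Claim_equal_base_n_value
  intro perm _
  unfold Spec_base_n_value base_n_value base_n_value_alt
  simp only
  rw [pv_horner_eq_sum (perm.length : Int) perm, PySem.List.foldl_add]
  simp
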